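-- pv_equiv track=rewrite | github.com/V13t4nh/Bot | Bot.py | group_consecutive_frames
-- ===== SOURCE A (Python) =====
-- def group_consecutive_frames(frames, states, reference_frames):
--     """
--     Gộp các khung thời gian liên tiếp có cùng trạng thái.
--
--     Args:
--         frames: Danh sách các khung thời gian cần gộp
--         states: Dictionary ánh xạ từ khung thời gian sang trạng thái
--         reference_frames: Danh sách tham chiếu để xác định thứ tự thực tế
--     """
--     if not frames:
--         return []
--
--     tf_to_idx = {tf: idx for idx, tf in enumerate(reference_frames)}
--
--     sorted_frames = sorted(frames, key=lambda tf: tf_to_idx.get(tf, float('inf')))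
--
--     result = []
--     start = sorted_frames[0]
--     current_state = states[start]
--     last_idx = tf_to_idx.get(start, -1)
--
--     for i in range(1, len(sorted_frames)):
--         frame = sorted_frames[i]
--         current_idx = tf_to_idx.get(frame, -1)
--
--         if states[frame] != current_state or current_idx != last_idx + 1:
--             if sorted_frames[i-1] == start:
--                 result.append(f"{start}: {current_state}")
--             else:
--                 result.append(f"{start}-{sorted_frames[i-1]}: {current_state}")
--             start = frame
--             current_state = states[frame]
--
--         last_idx = current_idx
--
--     if sorted_frames[-1] == start:
--         result.append(f"{start}: {current_state}")
--     else:
--         result.append(f"{start}-{sorted_frames[-1]}: {current_state}")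
--
--     return result
-- ===== SOURCE B (Python) =====
-- def group_consecutive_frames(frames, states, reference_frames):
--     if not frames:
--         return []
--
--     tf_to_idx = {tf: idx for idx, tf in enumerate(reference_frames)}
--
--     # counting placement instead of a comparison sort: tally the frames, then lay
--     # them out slot by slot along reference_frames (a frame sits at the slot of its
--     # last occurrence); frames absent from the reference keep their original order
--     # at the end.
--     cnt = {}
--     for f in frames:
--         cnt[f] = cnt.get(f, 0) + 1
--     ordered = []
--     for i, tf in enumerate(reference_frames):
--         if tf_to_idx[tf] == i and tf in cnt:
--             ordered += [tf] * cnt[tf]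
--     ordered += [f for f in frames if f not in tf_to_idx]
--
--     # partition the laid-out frames into maximal runs of equal state and
--     # consecutive reference indices (missing frames get index -1)
--     groups = []
--     cur = []
--     last_idx = -1
--     for frame in ordered:
--         idx = tf_to_idx.get(frame, -1)
--         if cur and states[frame] == states[cur[0]] and idx == last_idx + 1:
--             cur.append(frame)
--         else:
--             if cur:
--                 groups.append(cur)
--             cur = [frame]
--         last_idx = idx
--     groups.append(cur)
--
--     def fmt(g):
--         state = states[g[0]]
--         if g[-1] == g[0]:
--             return f"{g[0]}: {state}"
--         return f"{g[0]}-{g[-1]}: {state}"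
--
--     return [fmt(g) for g in groups]
-- ===== Notes on version B (the rewrite author's own statement) =====
-- stated objective: alternative
-- what changed: A comparison-sorts the frames by a reference-index key and formats range labels on the fly in one scan; B never sorts: it tallies the frames in a counter and lays them out by counting placement along reference_frames (absent frames appended in original order), then partitions that layout into explicit run sublists and formats each run in a separate pass.
import Mathlib
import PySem

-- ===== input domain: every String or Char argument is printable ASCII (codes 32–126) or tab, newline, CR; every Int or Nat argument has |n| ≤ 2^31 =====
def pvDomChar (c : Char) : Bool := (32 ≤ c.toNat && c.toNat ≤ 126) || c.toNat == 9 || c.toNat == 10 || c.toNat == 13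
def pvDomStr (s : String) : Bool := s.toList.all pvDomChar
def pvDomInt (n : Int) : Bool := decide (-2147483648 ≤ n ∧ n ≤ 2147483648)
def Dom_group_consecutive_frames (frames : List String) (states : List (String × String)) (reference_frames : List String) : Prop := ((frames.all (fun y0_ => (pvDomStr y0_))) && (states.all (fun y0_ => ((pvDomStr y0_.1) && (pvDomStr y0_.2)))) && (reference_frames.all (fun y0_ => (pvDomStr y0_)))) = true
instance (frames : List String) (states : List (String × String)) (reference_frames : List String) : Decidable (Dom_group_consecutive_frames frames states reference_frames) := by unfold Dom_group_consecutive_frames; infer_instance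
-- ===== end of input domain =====

-- B replaces A's comparison sort by counting placement along reference_frames (tally the
-- frames, lay them out slot by slot, absent frames appended in original order) and splits
-- A's formatting-while-scanning loop into a grouping pass plus a formatting pass.


-- ===== PORT A =====
-- tf_to_idx = {tf: idx for idx, tf in enumerate(reference_frames)} — shared by both ports,
-- both Pythons build it with this exact comprehension.
def pvIdxMap (reference_frames : List String) : PySem.Dict String Int :=
  (PySem.List.enumerate reference_frames).foldl (fun d p => d.insert p.2 p.1) PySem.Dict.empty

-- Python's sort key is `tf_to_idx.get(tf, float('inf'))`; every present index is
-- < reference_frames.length, so using reference_frames.length as the absent key gives the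
-- exact same comparisons (and the same stable ties). `states[...]` is ported as getD under
-- Pre_ (key present; Python raises KeyError otherwise, which Pre_ excludes).
-- The `for i in range(1, len(sorted_frames))` loop reads sorted_frames[i] and
-- sorted_frames[i-1]: it is the fold over the (prev, frame) pairs
-- sorted_frames.zip sorted_frames.tail with the same state (result, start, current_state, last_idx).
def group_consecutive_frames (frames : List String) (states : List (String × String)) (reference_frames : List String) : List String :=
  if frames = [] then []
  else
    let sd := PySem.Dict.ofList states
    let tf_to_idx := pvIdxMap reference_frames
    let sorted_frames :=
      PySem.List.sorted frames (fun tf => tf_to_idx.getD tf (reference_frames.length : Int)) false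
    let start := sorted_frames.headD ""
    let current_state := sd.getD start ""
    let last_idx := tf_to_idx.getD start (-1)
    let st := (sorted_frames.zip sorted_frames.tail).foldl
      (fun (acc : List String × String × String × Int) pf =>
        let (result, start, current_state, last_idx) := acc
        let frame := pf.2
        let current_idx := tf_to_idx.getD frame (-1)
        if sd.getD frame "" != current_state || current_idx != last_idx + 1 then
          (result ++ [if pf.1 == start then start ++ ": " ++ current_state
                      else start ++ "-" ++ pf.1 ++ ": " ++ current_state],
           frame, sd.getD frame "", current_idx)
        else
          (result, start, current_state, current_idx))
      ([], start, current_state, last_idx)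
    st.1 ++ [if sorted_frames.getLastD "" == st.2.1 then st.2.1 ++ ": " ++ st.2.2.1
             else st.2.1 ++ "-" ++ sorted_frames.getLastD "" ++ ": " ++ st.2.2.1]

-- ===== PORT B =====
-- format one group: "head: state" if the group begins and ends with the same frame,
-- else "head-last: state"
def pvFmtGroup (sd : PySem.Dict String String) (g : List String) : String :=
  let state := sd.getD (g.headD "") ""
  if g.getLastD "" == g.headD "" then g.headD "" ++ ": " ++ state
  else g.headD "" ++ "-" ++ g.getLastD "" ++ ": " ++ state

-- B: no sort — tally the frames (cnt), lay them out by counting placement along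
-- reference_frames (`ordered += [tf] * cnt[tf]` at the slot of tf's last occurrence),
-- append the frames missing from the reference in original order, then partition into
-- maximal runs and format each run.
def group_consecutive_frames_alt (frames : List String) (states : List (String × String)) (reference_frames : List String) : List String :=
  if frames = [] then []
  else
    let sd := PySem.Dict.ofList states
    let tf_to_idx := pvIdxMap reference_frames
    let cnt := frames.foldl (fun d f => d.insert f (d.getD f 0 + 1)) (PySem.Dict.empty : PySem.Dict String Int)
    let ordered :=
      ((PySem.List.enumerate reference_frames).foldl
        (fun acc p =>
          if tf_to_idx.getD p.2 (-1) == p.1 && cnt.contains p.2 then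
            acc ++ List.replicate (cnt.getD p.2 0).toNat p.2
          else acc) [])
      ++ frames.filter (fun f => !tf_to_idx.contains f)
    -- partition into maximal runs of equal state and consecutive indices
    let st := ordered.foldl
      (fun (acc : List (List String) × List String × Int) frame =>
        let (groups, cur, last_idx) := acc
        let idx := tf_to_idx.getD frame (-1)
        match cur with
        | [] => (groups, [frame], idx)
        | c0 :: _ =>
          if sd.getD frame "" == sd.getD c0 "" && idx == last_idx + 1 then
            (groups, cur ++ [frame], idx)
          else
            (groups ++ [cur], [frame], idx))
      ([], [], -1)
    -- format each run
    (st.1 ++ [st.2.1]).map (pvFmtGroup sd)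

-- ===== PRECONDITION & SPEC =====
-- A evaluates states[frame] for every frame; Python raises KeyError when a frame is not a
-- key of states, so exactly those inputs are excluded.
def Pre_group_consecutive_frames (frames : List String) (states : List (String × String)) (reference_frames : List String) : Prop :=
  ∀ f ∈ frames, (PySem.Dict.ofList states).contains f = true
instance (frames : List String) (states : List (String × String)) (reference_frames : List String) : Decidable (Pre_group_consecutive_frames frames states reference_frames) := by unfold Pre_group_consecutive_frames; infer_instance

def pvWitness_group_consecutive_frames : List String × (List (String × String)) × List String :=
  (["f2", "f1", "f3", "x"],
   [("f1", "up"), ("f2", "up"), ("f3", "down"), ("x", "up")],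
   ["f1", "f2", "f3"])

def Spec_group_consecutive_frames (frames : List String) (states : List (String × String)) (reference_frames : List String) (out : List String) : Prop := out = group_consecutive_frames_alt frames states reference_frames
instance (frames : List String) (states : List (String × String)) (reference_frames : List String) (out : List String) : Decidable (Spec_group_consecutive_frames frames states reference_frames out) := by unfold Spec_group_consecutive_frames; infer_instance

-- ===== CLAIM (what is proved, stated in full; the proofs are below) =====
def Claim_equal_group_consecutive_frames : Prop := ∀ (frames : List String) (states : List (String × String)) (reference_frames : List String), Dom_group_consecutive_frames frames states reference_frames → Pre_group_consecutive_frames frames states reference_frames → Spec_group_consecutive_frames frames states reference_frames (group_consecutive_frames frames states reference_frames)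

-- ===== LEMMAS AND PROOFS =====

lemma pvIdxMap_append (r : List String) (x : String) :
    pvIdxMap (r ++ [x]) = (pvIdxMap r).insert x (0 + (r.length : Int)) := by
  rw [pvIdxMap, PySem.List.enumerate_append, List.foldl_append]
  simp only [PySem.List.enumerate_cons, PySem.List.enumerate_nil, List.foldl_cons, List.foldl_nil]
  rfl

lemma pvIdxMap_get?_spec (reference_frames : List String) (tf : String) (i : Int) :
    (pvIdxMap reference_frames).get? tf = some i →
    ∃ (k : Nat) (h : k < reference_frames.length), i = (k : Int) ∧ reference_frames[k] = tf := by
  induction reference_frames using List.reverseRecOn with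
  | nil => intro h; simp [pvIdxMap, PySem.List.enumerate_nil, PySem.Dict.get?_empty] at h
  | append_singleton r x ih =>
    intro h
    rw [pvIdxMap_append, PySem.Dict.get?_insert] at h
    by_cases htf : tf = x
    · rw [if_pos htf] at h
      have hi : i = (r.length : Int) := by
        have := Option.some.inj h; omega
      refine ⟨r.length, by simp, hi, by simp [htf]⟩
    · rw [if_neg htf] at h
      obtain ⟨k, hk, hi, he⟩ := ih h
      exact ⟨k, by simp; omega, hi, by rw [List.getElem_append_left hk]; exact he⟩

lemma pvIdxMap_contains_of_mem (reference_frames : List String) (tf : String) :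
    tf ∈ reference_frames → (pvIdxMap reference_frames).contains tf = true := by
  induction reference_frames using List.reverseRecOn with
  | nil => intro h; simp at h
  | append_singleton r x ih =>
    intro h
    rw [pvIdxMap_append, PySem.Dict.contains_insert]
    rcases List.mem_append.mp h with h | h
    · rw [ih h]; simp
    · simp at h; simp [h]

lemma pvIdxMap_contains_iff (reference_frames : List String) (tf : String) :
    (pvIdxMap reference_frames).contains tf = true ↔ tf ∈ reference_frames := by
  constructor
  · intro h
    rw [PySem.Dict.contains_eq_isSome_get?] at h
    rcases hg : (pvIdxMap reference_frames).get? tf with _ | i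
    · rw [hg] at h; simp at h
    · obtain ⟨k, hk, _, he⟩ := pvIdxMap_get?_spec _ _ _ hg
      exact he ▸ List.getElem_mem hk
  · exact pvIdxMap_contains_of_mem _ _

lemma pv_insertBy_append {α : Type} (p : α → α → Bool) (x : α) :
    ∀ (S T : List α), (∀ t ∈ T, p x t = true) →
    PySem.List.insertBy p x (S ++ T) = PySem.List.insertBy p x S ++ T := by
  intro S
  induction S with
  | nil =>
    intro T hT
    cases T with
    | nil => simp
    | cons t ts =>
      simp only [List.nil_append, PySem.List.insertBy, hT t (by simp), if_true]
      rfl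
  | cons s S ih =>
    intro T hT
    by_cases hs : p x s
    · simp [PySem.List.insertBy, hs]
    · simp only [List.cons_append, PySem.List.insertBy, hs, Bool.false_eq_true, if_false]
      rw [ih T hT]

lemma pv_sorted_split {α : Type} (key : α → Int) (N : Int) (hk : ∀ f, key f ≤ N) :
    ∀ xs : List α, PySem.List.sorted xs key false =
      PySem.List.sorted (xs.filter (fun f => decide (key f < N))) key false
        ++ xs.filter (fun f => !decide (key f < N)) := by
  intro xs
  induction xs using List.reverseRecOn with
  | nil => simp
  | append_singleton l x ih =>
    rw [PySem.List.sorted_eq_foldl_insertBy, List.foldl_append, List.foldl_cons, List.foldl_nil,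
      ← PySem.List.sorted_eq_foldl_insertBy, ih, List.filter_append, List.filter_append]
    by_cases hx : key x < N
    · have h1 := pv_insertBy_append (fun a b => decide (key a < key b)) x
        (PySem.List.sorted (l.filter (fun f => decide (key f < N))) key false)
        (l.filter (fun f => !decide (key f < N)))
        (by
          intro t ht
          have := List.of_mem_filter ht
          simp only [Bool.not_eq_true', decide_eq_false_iff_not, not_lt] at this
          have h2 : key t = N := le_antisymm (hk t) this
          simp [h2, hx])
      rw [h1]
      have hfil : List.filter (fun f => decide (key f < N)) [x] = [x] := by simp [hx]
      have hfil2 : List.filter (fun f => !decide (key f < N)) [x] = [] := by simp [hx]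
      rw [hfil, hfil2, List.append_nil,
        PySem.List.sorted_eq_foldl_insertBy (List.filter (fun f => decide (key f < N)) l ++ [x]),
        List.foldl_append, List.foldl_cons, List.foldl_nil, ← PySem.List.sorted_eq_foldl_insertBy]
    · have hfx : key x = N := le_antisymm (hk x) (by omega)
      have h1 := PySem.List.insertBy_of_forall_not_before (fun a b => decide (key a < key b)) x
        (PySem.List.sorted (l.filter (fun f => decide (key f < N))) key false
          ++ l.filter (fun f => !decide (key f < N)))
        (by
          intro y hy
          rcases List.mem_append.mp hy with hy | hy
          · have := (PySem.List.mem_sorted _ _ _ _).mp hy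
            have := List.of_mem_filter this
            simp only [decide_eq_true_eq] at this
            simp only [decide_eq_false_iff_not, not_lt, hfx]
            omega
          · have := hk y
            simp only [decide_eq_false_iff_not, not_lt, hfx]
            omega)
      rw [h1]
      simp [hx, List.append_assoc]

lemma pv_sum_ite {α : Type} [BEq α] [LawfulBEq α] [DecidableEq α] (l : List α) (p₀ : α) (c : Nat) :
    (l.map (fun p => if p = p₀ then c else 0)).sum = l.count p₀ * c := by
  induction l with
  | nil => simp
  | cons a l ih =>
    simp only [List.map_cons, List.sum_cons, ih, List.count_cons]
    by_cases h : a = p₀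
    · simp [h, Nat.add_mul, Nat.add_comm]
    · simp [h]


-- the loop-level equivalence: A's formatting fold over (prev, frame) pairs, followed by the
-- final append, equals B's grouping fold followed by the formatting map.
lemma pv_loop (sd : PySem.Dict String String) (ix : String → Int) :
    ∀ (rest : List String) (prev start : String) (cur : List String)
      (groups : List (List String)) (li : Int),
      cur.headD "" = start → cur.getLastD "" = prev → cur ≠ [] →
      (let st := ((prev :: rest).zip rest).foldl
          (fun (acc : List String × String × String × Int) pf =>
            let (result, start, current_state, last_idx) := acc
            let frame := pf.2
            let current_idx := ix frame
            if sd.getD frame "" != current_state || current_idx != last_idx + 1 then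
              (result ++ [if pf.1 == start then start ++ ": " ++ current_state
                          else start ++ "-" ++ pf.1 ++ ": " ++ current_state],
               frame, sd.getD frame "", current_idx)
            else
              (result, start, current_state, current_idx))
          (groups.map (pvFmtGroup sd), start, sd.getD start "", li)
       st.1 ++ [if (prev :: rest).getLastD "" == st.2.1 then st.2.1 ++ ": " ++ st.2.2.1
                else st.2.1 ++ "-" ++ (prev :: rest).getLastD "" ++ ": " ++ st.2.2.1])
      =
      (let st := rest.foldl
          (fun (acc : List (List String) × List String × Int) frame =>
            let (groups, cur, last_idx) := acc
            let idx := ix frame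
            match cur with
            | [] => (groups, [frame], idx)
            | c0 :: _ =>
              if sd.getD frame "" == sd.getD c0 "" && idx == last_idx + 1 then
                (groups, cur ++ [frame], idx)
              else
                (groups ++ [cur], [frame], idx))
          (groups, cur, li)
       (st.1 ++ [st.2.1]).map (pvFmtGroup sd)) := by
  intro rest
  induction rest with
  | nil =>
    intro prev start cur groups li hh hl hne
    have hh' : cur.head?.getD "" = start := by rw [← List.headD_eq_head?_getD]; exact hh
    have hl' : cur.getLast?.getD "" = prev := by rw [← List.getLastD_eq_getLast?]; exact hl
    simp [pvFmtGroup, hh', hl']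
  | cons x xs ih =>
    intro prev start cur groups li hh hl hne
    obtain ⟨c0, ctl, rfl⟩ : ∃ c0 ctl, cur = c0 :: ctl := by
      cases cur with
      | nil => exact absurd rfl hne
      | cons a b => exact ⟨a, b, rfl⟩
    have hc0 : c0 = start := by simpa using hh
    subst hc0
    by_cases hcond : sd.getD x "" = sd.getD c0 "" ∧ ix x = li + 1
    · have h1 := ih x c0 ((c0 :: ctl) ++ [x]) groups (ix x)
        (by simp)
        (by rw [List.getLastD_concat])
        (by simp)
      have hA : (sd.getD x "" != sd.getD c0 "" || ix x != li + 1) = false := by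
        simp [hcond.1, hcond.2]
      have hB : (sd.getD x "" == sd.getD c0 "" && ix x == li + 1) = true := by
        simp [hcond.1, hcond.2]
      simp only [List.zip_cons_cons, List.foldl_cons, hA, hB, Bool.false_eq_true, if_false,
        if_true, List.getLastD_cons, List.cons_append] at h1 ⊢
      exact h1
    · have h1 := ih x x [x] (groups ++ [c0 :: ctl]) (ix x)
        (by simp) (by simp) (by simp)
      have hA : (sd.getD x "" != sd.getD c0 "" || ix x != li + 1) = true := by
        rcases not_and_or.mp hcond with h | h <;> simp [bne_iff_ne, h]
      have hB : (sd.getD x "" == sd.getD c0 "" && ix x == li + 1) = false := by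
        rcases not_and_or.mp hcond with h | h <;> simp [h]
      have hfmt : (if prev == c0 then c0 ++ ": " ++ sd.getD c0 ""
                   else c0 ++ "-" ++ prev ++ ": " ++ sd.getD c0 "")
          = pvFmtGroup sd (c0 :: ctl) := by
        have hl' : (c0 :: ctl).getLast?.getD "" = prev := by
          rw [← List.getLastD_eq_getLast?]; exact hl
        simp [pvFmtGroup, hl']
      simp only [List.zip_cons_cons, List.foldl_cons, hA, hB, Bool.false_eq_true, if_false,
        if_true, List.getLastD_cons, List.map_append, List.map_cons, List.map_nil] at h1 ⊢
      rw [hfmt]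
      exact h1

-- the sorted list of A equals the counting layout of B
lemma pv_sorted_eq_ordered (frames reference_frames : List String) :
    PySem.List.sorted frames
        (fun tf => (pvIdxMap reference_frames).getD tf (reference_frames.length : Int)) false
    = ((PySem.List.enumerate reference_frames).foldl
        (fun acc p =>
          if (pvIdxMap reference_frames).getD p.2 (-1) == p.1 &&
             (frames.foldl (fun d f => d.insert f (d.getD f 0 + 1)) (PySem.Dict.empty : PySem.Dict String Int)).contains p.2 then
            acc ++ List.replicate ((frames.foldl (fun d f => d.insert f (d.getD f 0 + 1)) (PySem.Dict.empty : PySem.Dict String Int)).getD p.2 0).toNat p.2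
          else acc) [])
      ++ frames.filter (fun f => !(pvIdxMap reference_frames).contains f) := by
  rw [PySem.Dict.foldl_insert_getD_add_one_eq_counter]
  set M := pvIdxMap reference_frames with hM
  set N := (reference_frames.length : Int) with hN
  set key : String → Int := fun tf => M.getD tf N with hkey
  -- basic facts about the key
  have hsome : ∀ f i, M.get? f = some i → 0 ≤ i ∧ i < N ∧
      ∃ (k : Nat) (h : k < reference_frames.length), i = (k : Int) ∧ reference_frames[k] = f := by
    intro f i hg
    obtain ⟨k, hk, hi, he⟩ := pvIdxMap_get?_spec _ _ _ hg
    exact ⟨by omega, by rw [hN]; omega, k, hk, hi, he⟩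
  have hkey_le : ∀ f, key f ≤ N := by
    intro f
    rw [hkey]
    rcases hg : M.get? f with _ | i
    · simp [PySem.Dict.getD_eq_get?_getD, hg]
    · have := (hsome f i hg).2.1
      simp [PySem.Dict.getD_eq_get?_getD, hg]; omega
  have hkey_lt : ∀ f, key f < N ↔ M.contains f = true := by
    intro f
    rw [hkey, PySem.Dict.contains_eq_isSome_get?]
    rcases hg : M.get? f with _ | i
    · simp [PySem.Dict.getD_eq_get?_getD, hg]
    · have := (hsome f i hg).2.1
      simp [PySem.Dict.getD_eq_get?_getD, hg]; omega
  -- the fold with a guarded append is a flatMap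
  have hfoldfun : (fun (acc : List String) (p : Int × String) =>
        if M.getD p.2 (-1) == p.1 && (PySem.Dict.counter frames).contains p.2 then
          acc ++ List.replicate ((PySem.Dict.counter frames).getD p.2 0).toNat p.2
        else acc)
      = (fun acc p => acc ++
          (if M.getD p.2 (-1) == p.1 && (PySem.Dict.counter frames).contains p.2 then
            List.replicate ((PySem.Dict.counter frames).getD p.2 0).toNat p.2
          else [])) := by
    funext acc p
    split <;> simp
  rw [hfoldfun, PySem.List.foldl_append_eq_flatMap, List.nil_append]
  set g : Int × String → List String := fun p =>
      if M.getD p.2 (-1) == p.1 && (PySem.Dict.counter frames).contains p.2 then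
        List.replicate ((PySem.Dict.counter frames).getD p.2 0).toNat p.2
      else [] with hg
  -- elements of a chunk: x ∈ g p → x = p.2 ∧ M.get? x = some p.1 ∧ key x = p.1
  have hchunk : ∀ p ∈ PySem.List.enumerate reference_frames 0, ∀ x ∈ g p,
      x = p.2 ∧ key x = p.1 := by
    intro p hp x hx
    rw [hg] at hx
    simp only at hx
    by_cases hc : (M.getD p.2 (-1) == p.1 && (PySem.Dict.counter frames).contains p.2) = true
    · rw [if_pos hc] at hx
      obtain ⟨-, hxeq⟩ := List.mem_replicate.mp hx
      have hgd : M.getD p.2 (-1) = p.1 := by simpa using (Bool.and_elim_left hc)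
      have hp1 : 0 ≤ p.1 := by
        obtain ⟨k, hk, hpe⟩ := (PySem.List.mem_enumerate_iff _ _ _).mp hp
        rw [hpe]; simp
      have hgs : M.get? p.2 = some p.1 := by
        rcases hq : M.get? p.2 with _ | i
        · rw [PySem.Dict.getD_eq_get?_getD, hq] at hgd; simp at hgd; omega
        · rw [PySem.Dict.getD_eq_get?_getD, hq] at hgd; simp at hgd; rw [hgd]
      refine ⟨hxeq, ?_⟩
      have : key x = M.getD x N := rfl
      rw [this, hxeq, PySem.Dict.getD_eq_get?_getD, hgs]; rfl
    · rw [if_neg hc] at hx; simp at hx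
  -- counting: g counts v exactly at the slot (M.getD v (-1), v)
  have hcount : ∀ (v : String) (p : Int × String),
      List.count v (g p) = if p = (M.getD v (-1), v) then frames.count v else 0 := by
    intro v p
    rcases p with ⟨pi, pt⟩
    rw [hg]
    simp only [Prod.mk.injEq]
    split_ifs with hc hp hp
    · rw [List.count_replicate, PySem.Dict.getD_counter]
      simp [hp.2]
    · have h1 : M.getD pt (-1) = pi := by simpa using (Bool.and_elim_left hc)
      rw [List.count_replicate, if_neg]
      intro h
      have hpt : pt = v := by simpa using h
      exact hp ⟨by rw [← hpt, h1], hpt⟩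
    · have hnc : (PySem.Dict.counter frames).contains pt = false := by
        rcases h : (PySem.Dict.counter frames).contains pt
        · rfl
        · exact absurd (by simp only [hp.2] at h; simp [hp.1, hp.2, h]) hc
      rw [PySem.Dict.contains_counter] at hnc
      have : frames.count v = 0 := List.count_eq_zero.mpr (by rw [← hp.2]; simpa using hnc)
      simp [this]
    · simp
  -- the slot pair is in enumerate iff v is in the reference list
  have hnodup : (PySem.List.enumerate reference_frames 0).Nodup := by
    have := PySem.List.pairwise_lt_enumerate reference_frames 0
    exact this.imp (fun {a b} h => by intro he; rw [he] at h; exact lt_irrefl _ h)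
  have hperm : (List.flatMap g (PySem.List.enumerate reference_frames 0)).Perm
      (frames.filter (fun f => decide (key f < N))) := by
    rw [List.perm_iff_count]
    intro v
    have hcg : (List.count v ∘ g) = fun p => if p = (M.getD v (-1), v) then frames.count v else 0 := by
      funext p; exact hcount v p
    rw [List.count_flatMap, hcg, pv_sum_ite]
    by_cases hmem : v ∈ reference_frames
    · have hc : M.contains v = true := (pvIdxMap_contains_iff _ _).mpr hmem
      have hlt : key v < N := (hkey_lt v).mpr hc
      rcases hq : M.get? v with _ | i
      · rw [PySem.Dict.contains_eq_isSome_get?, hq] at hc; simp at hc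
      · obtain ⟨_, _, k, hk, hi, he⟩ := hsome v i hq
        have hslot : (M.getD v (-1), v) ∈ PySem.List.enumerate reference_frames 0 := by
          rw [PySem.List.mem_enumerate_iff]
          refine ⟨k, hk, ?_⟩
          rw [PySem.Dict.getD_eq_get?_getD, hq, he]
          simp [hi]
        rw [List.count_eq_one_of_mem hnodup hslot, one_mul]
        rw [List.count_filter (by simp [hlt])]
    · have hc : M.contains v = false := by
        rcases h : M.contains v with _ | _
        · rfl
        · exact absurd ((pvIdxMap_contains_iff _ _).mp h) hmem
      have hslot : (M.getD v (-1), v) ∉ PySem.List.enumerate reference_frames 0 := by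
        intro h
        obtain ⟨k, hk, hpe⟩ := (PySem.List.mem_enumerate_iff _ _ _).mp h
        apply hmem
        have : v = reference_frames[k] := congrArg Prod.snd hpe
        rw [this]; exact List.getElem_mem hk
      rw [List.count_eq_zero.mpr hslot, zero_mul]
      rw [eq_comm, List.count_eq_zero]
      intro h
      have hmf := List.of_mem_filter h
      simp only [decide_eq_true_eq] at hmf
      have := (hkey_lt v).mp hmf
      rw [hc] at this
      simp at this
  -- the tail filters agree
  have htail : frames.filter (fun f => !M.contains f)
      = frames.filter (fun f => !decide (key f < N)) := by
    apply List.filter_congr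
    intro x _
    by_cases hlt : key x < N
    · rw [(hkey_lt x).mp hlt]; simp [hlt]
    · have hc : M.contains x = false := by
        rcases h : M.contains x
        · rfl
        · exact absurd ((hkey_lt x).mpr h) hlt
      simp [hc, hlt]
  rw [htail, pv_sorted_split key N hkey_le frames]
  congr 1
  apply List.Perm.eq_of_pairwise (le := fun a b => key a ≤ key b)
  · intro a b ha hb hab hba
    have hkeq : key a = key b := le_antisymm hab hba
    have ha' : a ∈ frames.filter (fun f => decide (key f < N)) :=
      (PySem.List.mem_sorted _ _ _ _).mp ha
    have hlta : key a < N := by simpa using (List.of_mem_filter ha')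
    have hga : M.get? a = some (key a) := by
      rcases hq : M.get? a with _ | i
      · exfalso
        have : key a = N := by
          show M.getD a N = N
          rw [PySem.Dict.getD_eq_get?_getD, hq]; rfl
        omega
      · have : key a = i := by
          show M.getD a N = i
          rw [PySem.Dict.getD_eq_get?_getD, hq]; rfl
        rw [this]
    obtain ⟨p, hp, hbp⟩ := List.mem_flatMap.mp hb
    obtain ⟨hbeq, hbkey⟩ := hchunk p hp b hbp
    have hltb : key b < N := by omega
    have hgb : M.get? b = some (key b) := by
      rcases hq : M.get? b with _ | i
      · exfalso
        have : key b = N := by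
          show M.getD b N = N
          rw [PySem.Dict.getD_eq_get?_getD, hq]; rfl
        omega
      · have : key b = i := by
          show M.getD b N = i
          rw [PySem.Dict.getD_eq_get?_getD, hq]; rfl
        rw [this]
    obtain ⟨k1, hk1, hi1, he1⟩ := pvIdxMap_get?_spec _ _ _ hga
    obtain ⟨k2, hk2, hi2, he2⟩ := pvIdxMap_get?_spec _ _ _ hgb
    have hk12 : k1 = k2 := by omega
    rw [← he1, ← he2]
    congr 1
  · exact PySem.List.sorted_pairwise _ _
  · rw [List.pairwise_flatMap]
    constructor
    · intro p hp
      rw [hg]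
      simp only
      split
      · exact List.pairwise_replicate.mpr (Or.inr (le_refl _))
      · simp
    · have hpe := PySem.List.pairwise_lt_enumerate reference_frames 0
      refine hpe.imp_of_mem ?_
      intro p q hp hq hlt x hxp y hyq
      have h1 := (hchunk p hp x hxp).2
      have h2 := (hchunk q hq y hyq).2
      rw [h1, h2]
      exact le_of_lt hlt
  · exact (PySem.List.sorted_perm _ _ _).trans hperm.symm

theorem group_consecutive_frames_spec : Claim_equal_group_consecutive_frames := by
  intro frames states reference_frames _hdom _hpre
  unfold Spec_group_consecutive_frames group_consecutive_frames group_consecutive_frames_alt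
  by_cases hf : frames = []
  · simp [hf]
  · simp only [hf, if_false]
    set sd := PySem.Dict.ofList states with hsd
    set tf_to_idx := pvIdxMap reference_frames with hidx
    set ss := PySem.List.sorted frames
        (fun tf => tf_to_idx.getD tf (reference_frames.length : Int)) false with hss
    have hord := pv_sorted_eq_ordered frames reference_frames
    rw [← hidx, ← hss] at hord
    rw [← hord]
    have hne : ss ≠ [] := by
      rw [hss]
      simp [PySem.List.sorted_eq_nil_iff, hf]
    rcases hcase : ss with _ | ⟨s0, rest⟩
    · exact absurd hcase hne
    · have h := pv_loop sd (fun t => tf_to_idx.getD t (-1)) rest s0 s0 [s0] [] (tf_to_idx.getD s0 (-1))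
        (by simp) (by simp) (by simp)
      simpa using h
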